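-- pv_equiv track=rewrite | github.com/ruchikasute/all_responses_demo | app.py | get_most_relevant_reference
-- ===== SOURCE A (Python) =====
-- def get_most_relevant_reference(reference_text, condensed_rfp, keyword_hint=None):
--     """
--     Filters the large reference document to keep only the 2 most relevant paragraphs
--     based on keyword overlap with the condensed RFP text.
--     This reduces token size and speeds up prompt processing.
--     """
--     paragraphs = reference_text.split("\n\n")
--     condensed_keywords = set(condensed_rfp.lower().split())
--
--     if keyword_hint:
--         condensed_keywords |= set(keyword_hint.lower().split())
--
--     scores = []
--     for p in paragraphs:
--         overlap = len(set(p.lower().split()) & condensed_keywords)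
--         scores.append((overlap, p))
--     best = sorted(scores, reverse=True)[:2]
--     return "\n\n".join([p for _, p in best])
-- ===== SOURCE B (Python) =====
-- def _score(paragraph, keywords):
--     return len(set(paragraph.lower().split()) & keywords)
--
--
-- def get_most_relevant_reference(reference_text, condensed_rfp, keyword_hint=None):
--     keywords = set(condensed_rfp.lower().split())
--     if keyword_hint:
--         keywords |= set(keyword_hint.lower().split())
--
--     first = None   # best (overlap, paragraph) tuple so far
--     second = None  # runner-up tuple so far
--     for p in reference_text.split("\n\n"):
--         cand = (_score(p, keywords), p)
--         if first is None or cand > first: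
--             first, second = cand, first
--         elif second is None or cand > second:
--             second = cand
--
--     best = [t for t in (first, second) if t is not None]
--     return "\n\n".join(p for _, p in best)
-- ===== Notes on version B (the rewrite author's own statement) =====
-- stated objective: alternative
-- what changed: B replaces the full descending insertion of all (overlap, paragraph) tuples into a sorted list by a single pass that maintains only the best and second-best tuple under Python's full tuple comparison, then joins those two.
import Mathlib
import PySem

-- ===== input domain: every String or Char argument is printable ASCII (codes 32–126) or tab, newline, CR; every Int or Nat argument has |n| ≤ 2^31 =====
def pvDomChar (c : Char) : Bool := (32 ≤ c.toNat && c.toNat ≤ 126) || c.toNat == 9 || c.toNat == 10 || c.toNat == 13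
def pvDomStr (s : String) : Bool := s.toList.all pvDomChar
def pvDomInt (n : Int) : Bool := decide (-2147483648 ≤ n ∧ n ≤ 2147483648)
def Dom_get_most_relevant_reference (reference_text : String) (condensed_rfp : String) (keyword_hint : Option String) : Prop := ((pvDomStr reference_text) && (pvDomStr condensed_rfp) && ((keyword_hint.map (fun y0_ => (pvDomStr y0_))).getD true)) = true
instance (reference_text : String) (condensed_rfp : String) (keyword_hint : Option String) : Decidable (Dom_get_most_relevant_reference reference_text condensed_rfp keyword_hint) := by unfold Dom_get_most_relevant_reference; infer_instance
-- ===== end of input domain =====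

-- B replaces the full descending sort of all (overlap, paragraph) scores by a single pass
-- keeping only the best and second-best tuple (alternative decomposition; same results).


-- ===== PORT A =====
-- literal transliteration of A: score every paragraph, sort all scores descending
-- (Python tuple order = int first, then string), take the first two, join.
def get_most_relevant_reference (reference_text : String) (condensed_rfp : String) (keyword_hint : Option String) : String :=
  let paragraphs : List String := (PySem.Str.split? reference_text "\n\n").getD []  -- sep is non-empty, the none case never occurs
  let condensed_keywords : PySem.Set String :=
    PySem.Set.ofList (PySem.Str.split₀ (PySem.Str.lower condensed_rfp))
  let condensed_keywords : PySem.Set String :=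
    match keyword_hint with
    | some h => if h = "" then condensed_keywords
        else PySem.Set.union condensed_keywords (PySem.Set.ofList (PySem.Str.split₀ (PySem.Str.lower h)))
    | none => condensed_keywords
  let scores : List (Int × String) :=
    paragraphs.foldl (fun acc p =>
      let overlap : Int :=
        PySem.Set.len (PySem.Set.inter (PySem.Set.ofList (PySem.Str.split₀ (PySem.Str.lower p))) condensed_keywords)
      acc ++ [(overlap, p)]) []
  let best := PySem.List.slice (PySem.List.sorted2 scores Prod.fst Prod.snd true) none (some 2)
  PySem.Str.join "\n\n" (best.map (fun t => t.2))

-- ===== PORT B =====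
-- B-side helpers (transliterations of Source B)
-- Python's strict 'cand > t' on (int, str) tuples, as a Bool
def pyTupGt (a b : Int × String) : Bool :=
  decide (b.1 < a.1) || (!decide (a.1 < b.1) && decide (b.2 < a.2))

-- _score(paragraph, keywords)
def pvScore (keywords : PySem.Set String) (paragraph : String) : Int :=
  PySem.Set.len (PySem.Set.inter (PySem.Set.ofList (PySem.Str.split₀ (PySem.Str.lower paragraph))) keywords)

-- the body of B's loop: update (first, second) with candidate tuple cand
def pvStep (st : Option (Int × String) × Option (Int × String)) (cand : Int × String) :
    Option (Int × String) × Option (Int × String) :=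
  match st with
  | (none, _) => (some cand, none)
  | (some f, s?) =>
    if pyTupGt cand f then (some cand, some f)
    else match s? with
      | none => (some f, some cand)
      | some s => if pyTupGt cand s then (some f, some cand) else (some f, some s)

def get_most_relevant_reference_alt (reference_text : String) (condensed_rfp : String) (keyword_hint : Option String) : String :=
  let keywords : PySem.Set String :=
    PySem.Set.ofList (PySem.Str.split₀ (PySem.Str.lower condensed_rfp))
  let keywords : PySem.Set String :=
    match keyword_hint with
    | some h => if h = "" then keywords
        else PySem.Set.union keywords (PySem.Set.ofList (PySem.Str.split₀ (PySem.Str.lower h)))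
    | none => keywords
  let st := ((PySem.Str.split? reference_text "\n\n").getD []).foldl
      (fun st p => pvStep st (pvScore keywords p, p)) (none, none)
  let best : List (Int × String) :=
    (match st.1 with | some f => [f] | none => []) ++ (match st.2 with | some s => [s] | none => [])
  PySem.Str.join "\n\n" (best.map (fun t => t.2))

-- ===== PRECONDITION & SPEC =====
def Spec_get_most_relevant_reference (reference_text : String) (condensed_rfp : String) (keyword_hint : Option String) (out : String) : Prop := out = get_most_relevant_reference_alt reference_text condensed_rfp keyword_hint
instance (reference_text : String) (condensed_rfp : String) (keyword_hint : Option String) (out : String) : Decidable (Spec_get_most_relevant_reference reference_text condensed_rfp keyword_hint out) := by unfold Spec_get_most_relevant_reference; infer_instance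

-- ===== CLAIM (what is proved, stated in full; the proofs are below) =====
def Claim_equal_get_most_relevant_reference : Prop := ∀ (reference_text : String) (condensed_rfp : String) (keyword_hint : Option String), Dom_get_most_relevant_reference reference_text condensed_rfp keyword_hint → Spec_get_most_relevant_reference reference_text condensed_rfp keyword_hint (get_most_relevant_reference reference_text condensed_rfp keyword_hint)

-- ===== LEMMAS AND PROOFS =====

-- view of a list by its first two elements, as B's (first, second) state
def pvTop2View (l : List (Int × String)) : Option (Int × String) × Option (Int × String) :=
  match l with
  | [] => (none, none)
  | [a] => (some a, none)
  | a :: b :: _ => (some a, some b)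

-- one insertion step of A's (reverse-) insertion sort, seen through the first two
-- elements, is exactly B's top-2 update step
theorem pvTop2View_insertBy (acc : List (Int × String)) (x : Int × String) :
    pvTop2View (PySem.List.insertBy (fun a b => pyTupGt a b) x acc) =
      pvStep (pvTop2View acc) x := by
  match acc with
  | [] => rfl
  | [a] =>
    simp only [PySem.List.insertBy, pvTop2View, pvStep]
    by_cases h : pyTupGt x a <;> simp [h]
  | a :: b :: t =>
    simp only [PySem.List.insertBy, pvTop2View, pvStep]
    by_cases h1 : pyTupGt x a <;> by_cases h2 : pyTupGt x b <;> simp [h1, h2]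

-- the whole fold: B's loop state is the top-2 view of A's insertion-sorted list
theorem pvTop2View_foldl (l : List (Int × String)) (acc : List (Int × String)) :
    pvTop2View (l.foldl (fun acc x => PySem.List.insertBy (fun a b => pyTupGt a b) x acc) acc) =
      l.foldl pvStep (pvTop2View acc) := by
  induction l generalizing acc with
  | nil => rfl
  | cons x t ih => simp only [List.foldl_cons, ih, pvTop2View_insertBy]

-- the first two elements of a list, through the view
theorem pvTake2_eq_view (l : List (Int × String)) :
    l.take 2 = (match (pvTop2View l).1 with | some f => [f] | none => []) ++
               (match (pvTop2View l).2 with | some s => [s] | none => []) := by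
  match l with
  | [] => rfl
  | [a] => rfl
  | a :: b :: t => rfl

theorem get_most_relevant_reference_eq (reference_text : String) (condensed_rfp : String)
    (keyword_hint : Option String) :
    get_most_relevant_reference reference_text condensed_rfp keyword_hint =
      get_most_relevant_reference_alt reference_text condensed_rfp keyword_hint := by
  unfold get_most_relevant_reference get_most_relevant_reference_alt
  simp only [PySem.List.foldl_append_singleton_eq_map, List.nil_append]
  -- name the shared pieces
  set kw : PySem.Set String :=
    (match keyword_hint with
    | some h => if h = "" then PySem.Set.ofList (PySem.Str.split₀ (PySem.Str.lower condensed_rfp))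
        else PySem.Set.union (PySem.Set.ofList (PySem.Str.split₀ (PySem.Str.lower condensed_rfp)))
          (PySem.Set.ofList (PySem.Str.split₀ (PySem.Str.lower h)))
    | none => PySem.Set.ofList (PySem.Str.split₀ (PySem.Str.lower condensed_rfp))) with hkw
  set ps : List String := (PySem.Str.split? reference_text "\n\n").getD [] with hps
  -- A's sorted2 is a foldl of insertBy with exactly pyTupGt
  have hsorted : PySem.List.sorted2 (ps.map (fun p => (pvScore kw p, p))) Prod.fst Prod.snd true =
      (ps.map (fun p => (pvScore kw p, p))).foldl
        (fun acc x => PySem.List.insertBy (fun a b => pyTupGt a b) x acc) [] := by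
    simp only [PySem.List.sorted2, pyTupGt]
    rfl
  have hslice : ∀ l : List (Int × String), PySem.List.slice l none (some 2) = l.take 2 := by
    intro l
    have := PySem.List.slice_to (xs := l) (b := 2) (by norm_num)
    simpa using this
  simp only [pvScore] at hsorted ⊢
  rw [hsorted, hslice, pvTake2_eq_view, pvTop2View_foldl]
  rw [List.foldl_map]
  rfl

-- ===== VERDICT (by name: the statement is the Claim_ definition above) =====
theorem get_most_relevant_reference_spec : Claim_equal_get_most_relevant_reference := by
  intro rt cr kh _
  unfold Spec_get_most_relevant_reference
  exact get_most_relevant_reference_eq rt cr kh
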